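-- pv_equiv track=rewrite | github.com/uniqueimaginate/Coding | Archive/Programmers/kakao/무지의먹방라이브.py | solution
-- ===== SOURCE A (Python) =====
-- import heapq
--
-- def solution(food_times, k):
--
--     if sum(food_times) <= k:
--         return -1
--
--     heap = []
--     for i, time in enumerate(food_times):
--         heapq.heappush(heap, (time, i+1))
--
--
--     sum_value = 0
--     prev = 0
--     length = len(food_times)
--
--     while sum_value + ((heap[0][0] - prev) * length) <= k:
--         cur = heapq.heappop(heap)[0]
--         sum_value += ((cur - prev) * length)
--         length -= 1
--         prev = cur
--
--
--     result = sorted(heap, key = lambda x: x[1])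
--     return result[(k - sum_value) % len(heap)][1]
-- ===== SOURCE B (Python) =====
-- def solution(food_times, k):
--     # Binary search on the "water level" x: the largest x with
--     # eaten(x) = sum(min(t, x)) <= k.  Foods with t > x survive; the
--     # (k - eaten(x))-th of them (in index order, cyclically) is the answer.
--     if sum(food_times) <= k:
--         return -1
--     n = len(food_times)
--
--     def eaten(x):
--         return sum(min(t, x) for t in food_times)
--
--     lo = min(min(food_times), -abs(k) - 1)   # eaten(lo) = lo*n <= k
--     hi = max(food_times)                     # eaten(hi) = total > k
--     while lo + 1 < hi:
--         mid = (lo + hi) // 2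
--         if eaten(mid) <= k:
--             lo = mid
--         else:
--             hi = mid
--     remaining = [i + 1 for i, t in enumerate(food_times) if t > lo]
--     return remaining[(k - eaten(lo)) % len(remaining)]
-- ===== Notes on version B (the rewrite author's own statement) =====
-- stated objective: alternative
-- what changed: Replaces the heap simulation (repeatedly popping the minimum food and advancing time food-by-food) with a binary search on the 'water level' x maximizing sum(min(t,x)) <= k; the surviving foods are then read off by a single filter in index order, with no heap and no sorting at all.
import Mathlib
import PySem

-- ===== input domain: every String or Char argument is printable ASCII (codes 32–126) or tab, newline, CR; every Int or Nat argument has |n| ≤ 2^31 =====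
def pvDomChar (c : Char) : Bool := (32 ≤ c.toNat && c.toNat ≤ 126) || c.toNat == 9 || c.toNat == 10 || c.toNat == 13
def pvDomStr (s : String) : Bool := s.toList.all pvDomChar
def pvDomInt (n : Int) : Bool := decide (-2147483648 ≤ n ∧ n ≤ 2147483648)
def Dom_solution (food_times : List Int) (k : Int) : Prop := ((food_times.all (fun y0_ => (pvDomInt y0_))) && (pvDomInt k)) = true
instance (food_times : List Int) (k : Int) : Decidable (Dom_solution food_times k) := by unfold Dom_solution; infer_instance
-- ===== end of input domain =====

-- B replaces A's heap simulation (pop the minimum food, advance time food-by-food) with a binary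
-- search on the largest "water level" x with sum(min(t,x)) <= k, reading the surviving foods off
-- by one filter in index order — no heap and no sorting; objective: alternative algorithm.

-- ===== PORT A =====
-- heapq is ported by its contract: the heap is the list of pushed items, heap[0]/heappop is the
-- lexicographically least tuple; pvPopMin extracts it (exact: all tuples have distinct indices,
-- and the only other use of the heap, sorted(heap, key=x[1]), does not depend on internal order).
def pvPopMin (x : Int × Int) : List (Int × Int) → (Int × Int) × List (Int × Int)
  | [] => (x, [])
  | y :: ys =>
    if toLex x ≤ toLex y then
      let r := pvPopMin x ys
      (r.1, y :: r.2)
    else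
      let r := pvPopMin y ys
      (r.1, x :: r.2)

theorem pvPopMin_length (x : Int × Int) (l : List (Int × Int)) :
    (pvPopMin x l).2.length = l.length := by
  induction l generalizing x with
  | nil => rfl
  | cons y ys ih =>
      simp only [pvPopMin]
      split <;> simp [ih]

-- the while loop; the [] branch is Python's IndexError on heap[0] (excluded by Pre_solution)
def pvLoopA (k : Int) (heap : List (Int × Int)) (sum_value prev length : Int) : Int :=
  match heap with
  | [] => 0
  | x :: t =>
    let m := pvPopMin x t
    if sum_value + (m.1.1 - prev) * length ≤ k then
      pvLoopA k m.2 (sum_value + (m.1.1 - prev) * length) m.1.1 (length - 1)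
    else
      let result := PySem.List.sorted (x :: t) (fun e => e.2) false
      ((PySem.List.pyGet? result (PySem.Int.mod (k - sum_value) ((x :: t).length : Int))).getD (0, 0)).2
termination_by heap.length
decreasing_by simp [pvPopMin_length]

def solution (food_times : List Int) (k : Int) : Int :=
  if food_times.sum ≤ k then -1
  else
    let heap := (PySem.List.enumerate food_times).map (fun p => (p.2, p.1 + 1))
    pvLoopA k heap 0 0 (food_times.length : Int)

-- ===== PORT B =====
-- eaten(x) = sum(min(t, x) for t in food_times)
def pvEaten (food_times : List Int) (x : Int) : Int :=
  (food_times.map (fun t => min t x)).sum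

-- the while loop of B's binary search: largest x in [lo, hi) with eaten(x) <= k,
-- given eaten(lo) <= k < eaten(hi)
def pvBSearch (food_times : List Int) (k lo hi : Int) : Int :=
  if lo + 1 < hi then
    -- mid = (lo + hi) // 2, inlined into the branch
    if pvEaten food_times (PySem.Int.floordiv (lo + hi) 2) ≤ k then
      pvBSearch food_times k (PySem.Int.floordiv (lo + hi) 2) hi
    else pvBSearch food_times k lo (PySem.Int.floordiv (lo + hi) 2)
  else lo
termination_by (hi - lo).toNat
decreasing_by
  · have h := PySem.Int.floordiv_two_mid_bounds (lo := lo + 1) (hi := hi - 1) (by omega)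
    have : lo + 1 + (hi - 1) = lo + hi := by ring
    rw [this] at h
    omega
  · have h := PySem.Int.floordiv_two_mid_bounds (lo := lo + 1) (hi := hi - 1) (by omega)
    have : lo + 1 + (hi - 1) = lo + hi := by ring
    rw [this] at h
    omega

def solution_alt (food_times : List Int) (k : Int) : Int :=
  if food_times.sum ≤ k then -1
  else
    -- min(food_times)/max(food_times) raise ValueError on []; excluded by Pre_solution
    let lo := min ((PySem.List.min? food_times (fun t => t)).getD 0) (-|k| - 1)
    let hi := (PySem.List.max? food_times (fun t => t)).getD 0
    let x := pvBSearch food_times k lo hi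
    let remaining := ((PySem.List.enumerate food_times).filter
      (fun p => decide (x < p.2))).map (fun p => p.1 + 1)
    (PySem.List.pyGet? remaining
      (PySem.Int.mod (k - pvEaten food_times x) (remaining.length : Int))).getD 0

-- ===== PRECONDITION & SPEC =====
-- Pre_ excludes only the empty list with k < 0, where Python A raises IndexError on heap[0]
-- (B raises ValueError on min([]) there); on every other input A returns normally.
def Pre_solution (food_times : List Int) (k : Int) : Prop := food_times = [] → 0 ≤ k
instance (food_times : List Int) (k : Int) : Decidable (Pre_solution food_times k) := by unfold Pre_solution; infer_instance
def pvWitness_solution : List Int × Int := ([3, 1, 2], 5)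

def Spec_solution (food_times : List Int) (k : Int) (out : Int) : Prop := out = solution_alt food_times k
instance (food_times : List Int) (k : Int) (out : Int) : Decidable (Spec_solution food_times k out) := by unfold Spec_solution; infer_instance

-- ===== CLAIM (what is proved, stated in full; the proofs are below) =====
def Claim_equal_solution : Prop := ∀ (food_times : List Int) (k : Int), Dom_solution food_times k → Pre_solution food_times k → Spec_solution food_times k (solution food_times k)

-- ===== LEMMAS AND PROOFS =====

-- A's initial heap, as a proof-side abbreviation
def pvE (food_times : List Int) : List (Int × Int) :=
  (PySem.List.enumerate food_times).map (fun p => (p.2, p.1 + 1))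

-- the cursor walk over the sorted heap: intermediate between A's heap loop and B's binary search
def pvWalk (k : Int) (foods : List (Int × Int)) (sum_value prev : Int) : Int :=
  match foods with
  | [] => 0
  | f :: rest =>
    if sum_value + (f.1 - prev) * ((f :: rest).length : Int) ≤ k then
      pvWalk k rest (sum_value + (f.1 - prev) * ((f :: rest).length : Int)) f.1
    else
      let remaining := f :: rest
      let result := PySem.List.sorted remaining (fun e => e.2) false
      ((PySem.List.pyGet? result (PySem.Int.mod (k - sum_value) (remaining.length : Int))).getD (0, 0)).2

theorem pvPopMin_perm (x : Int × Int) (l : List (Int × Int)) :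
    ((pvPopMin x l).1 :: (pvPopMin x l).2).Perm (x :: l) := by
  induction l generalizing x with
  | nil => rfl
  | cons y ys ih =>
      simp only [pvPopMin]
      split
      · dsimp only
        exact ((List.Perm.swap y (pvPopMin x ys).1 (pvPopMin x ys).2).trans
          ((ih x).cons y)).trans (List.Perm.swap x y ys)
      · dsimp only
        exact (List.Perm.swap x (pvPopMin y ys).1 (pvPopMin y ys).2).trans ((ih y).cons x)

theorem pvPopMin_isMin (x : Int × Int) (l : List (Int × Int)) :
    ∀ y ∈ x :: l, toLex (pvPopMin x l).1 ≤ toLex y := by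
  induction l generalizing x with
  | nil => simp [pvPopMin]
  | cons z zs ih =>
      intro y hy
      simp only [pvPopMin]
      split
      · rename_i hxz
        dsimp only
        rcases List.mem_cons.1 hy with h | h
        · rw [h]; exact ih x x (by simp)
        · rcases List.mem_cons.1 h with h | h
          · rw [h]; exact le_trans (ih x x (by simp)) hxz
          · exact ih x y (by simp [h])
      · rename_i hxz
        dsimp only
        rcases List.mem_cons.1 hy with h | h
        · rw [h]
          exact le_trans (ih z z (by simp)) (le_of_lt (lt_of_not_ge hxz))
        · exact ih z y (by simpa using h)

theorem toLex_key_ne (a b : Int × Int) (h : a.2 ≠ b.2) : toLex a ≠ toLex b := by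
  intro hh
  exact h (congrArg (fun p => (ofLex p).2) hh)

-- sorting by the (distinct) index does not depend on the order of the input list
theorem sortedSnd_eq_of_perm {l1 l2 : List (Int × Int)} (hp : l1.Perm l2)
    (hn : (l1.map Prod.snd).Nodup) :
    PySem.List.sorted l1 (fun e => e.2) false = PySem.List.sorted l2 (fun e => e.2) false := by
  apply PySem.List.sorted_eq_of_perm_of_pairwise_lt
  · exact ((PySem.List.sorted_perm l2 (fun e => e.2) false).trans hp.symm)
  · have h1 : l1.Pairwise (fun a b => a.2 ≠ b.2) := List.pairwise_map.mp hn
    have h2 : l2.Pairwise (fun a b => a.2 ≠ b.2) :=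
      (hp.pairwise_iff (fun h => h.symm)).1 h1
    have hne : (PySem.List.sorted l2 (fun e => e.2) false).Pairwise (fun a b => a.2 ≠ b.2) :=
      ((PySem.List.sorted_perm l2 (fun e => e.2) false).pairwise_iff (fun h => h.symm)).2 h2
    exact ((PySem.List.sorted_pairwise l2 (fun e => e.2)).and hne).imp
      (fun h => lt_of_le_of_ne h.1 h.2)

-- sorted (x :: t) starts with the minimum that pvPopMin extracts
theorem sorted_cons_popMin (x : Int × Int) (t : List (Int × Int))
    (hn : ((x :: t).map Prod.snd).Nodup) :
    PySem.List.sorted (x :: t) (fun e => toLex e) false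
      = (pvPopMin x t).1 :: PySem.List.sorted (pvPopMin x t).2 (fun e => toLex e) false := by
  apply PySem.List.sorted_eq_of_perm_of_pairwise_lt
  · exact (((PySem.List.sorted_perm (pvPopMin x t).2 (fun e => toLex e) false).cons
      (pvPopMin x t).1).trans (pvPopMin_perm x t))
  · have hnd : (x :: t).Pairwise (fun a b => a.2 ≠ b.2) := List.pairwise_map.mp hn
    have hnd' : ((pvPopMin x t).1 :: (pvPopMin x t).2).Pairwise (fun a b => a.2 ≠ b.2) :=
      ((pvPopMin_perm x t).pairwise_iff (fun h => h.symm)).2 hnd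
    have hnd2 : ((pvPopMin x t).2).Pairwise (fun a b => a.2 ≠ b.2) :=
      (List.pairwise_cons.1 hnd').2
    have hhd : ∀ y ∈ (pvPopMin x t).2, (pvPopMin x t).1.2 ≠ y.2 :=
      (List.pairwise_cons.1 hnd').1
    refine List.pairwise_cons.2 ⟨?_, ?_⟩
    · intro y hy
      have hy' : y ∈ (pvPopMin x t).2 :=
        (PySem.List.sorted_perm (pvPopMin x t).2 (fun e => toLex e) false).mem_iff.1 hy
      have hle : toLex (pvPopMin x t).1 ≤ toLex y :=
        pvPopMin_isMin x t y ((pvPopMin_perm x t).mem_iff.1 (by simp [hy']))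
      exact lt_of_le_of_ne hle (toLex_key_ne _ _ (hhd y hy'))
    · have hne : (PySem.List.sorted (pvPopMin x t).2 (fun e => toLex e) false).Pairwise
          (fun a b => a.2 ≠ b.2) :=
        ((PySem.List.sorted_perm (pvPopMin x t).2 (fun e => toLex e) false).pairwise_iff
          (fun h => h.symm)).2 hnd2
      exact ((PySem.List.sorted_pairwise (pvPopMin x t).2 (fun e => toLex e)).and hne).imp
        (fun h => lt_of_le_of_ne h.1 (toLex_key_ne _ _ h.2))

-- A's heap loop on l = the cursor walk on sorted l
theorem loop_eq (k : Int) : ∀ (n : Nat) (l : List (Int × Int)), l.length = n →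
    (l.map Prod.snd).Nodup → ∀ (sv prev : Int),
    pvLoopA k l sv prev (l.length : Int)
      = pvWalk k (PySem.List.sorted l (fun e => toLex e) false) sv prev := by
  intro n
  induction n using Nat.strong_induction_on with
  | _ n ih =>
    intro l hL hn sv prev
    match l with
    | [] => simp [pvLoopA, pvWalk, PySem.List.sorted]
    | x :: t =>
      have hsort := sorted_cons_popMin x t hn
      have hlen2 : (pvPopMin x t).2.length = t.length := pvPopMin_length x t
      have hlenS : (PySem.List.sorted (pvPopMin x t).2 (fun e => toLex e) false).length
          = t.length := by rw [PySem.List.length_sorted, hlen2]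
      rw [hsort]
      rw [pvLoopA]
      simp only [pvWalk]
      have hhead : (((pvPopMin x t).1 ::
          PySem.List.sorted (pvPopMin x t).2 (fun e => toLex e) false).length : Int)
          = ((x :: t).length : Int) := by simp [hlenS]
      rw [hhead]
      split
      · -- loop continues
        have hn2 : ((pvPopMin x t).2.map Prod.snd).Nodup := by
          have h0 : (((pvPopMin x t).1 :: (pvPopMin x t).2).map Prod.snd).Nodup :=
            (List.Perm.nodup_iff (List.Perm.map Prod.snd (pvPopMin_perm x t))).2 hn
          simpa using h0.of_cons
        have hcast : ((x :: t).length : Int) - 1 = ((pvPopMin x t).2.length : Int) := by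
          simp [hlen2]
        rw [hcast]
        exact ih t.length (by omega) (pvPopMin x t).2 hlen2 hn2 _ _
      · -- loop exits: both index the index-sorted remaining list
        have hrem : PySem.List.sorted ((pvPopMin x t).1 ::
              PySem.List.sorted (pvPopMin x t).2 (fun e => toLex e) false) (fun e => e.2) false
            = PySem.List.sorted (x :: t) (fun e => e.2) false := by
          rw [← hsort]
          exact sortedSnd_eq_of_perm
            (PySem.List.sorted_perm (x :: t) (fun e => toLex e) false)
            ((List.Perm.nodup_iff (List.Perm.map Prod.snd
              (PySem.List.sorted_perm (x :: t) (fun e => toLex e) false))).2 hn)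
        rw [hrem]

theorem enumerate_snd_nodup (l : List Int) :
    ((pvE l).map Prod.snd).Nodup := by
  simp only [pvE, List.map_map, List.Nodup, List.pairwise_map]
  exact (PySem.List.pairwise_lt_enumerate l 0).imp (by intro a b hab; simp; omega)

theorem pvE_map_fst (l : List Int) : (pvE l).map Prod.fst = l := by
  simp only [pvE, List.map_map]
  exact PySem.List.map_snd_enumerate l 0

theorem pvE_length (l : List Int) : (pvE l).length = l.length := by
  have := congrArg List.length (pvE_map_fst l)
  simpa using this

-- eaten over a pair list (indices carried along)
def pvFL (l : List (Int × Int)) (x : Int) : Int := (l.map (fun e => min e.1 x)).sum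

theorem pvFL_pvE (ft : List Int) (x : Int) : pvFL (pvE ft) x = pvEaten ft x := by
  simp only [pvFL, pvEaten]
  rw [show ((pvE ft).map (fun e => min e.1 x)) = (((pvE ft).map Prod.fst).map (fun t => min t x)) by
    simp [List.map_map]]
  rw [pvE_map_fst]

theorem pvFL_perm {l1 l2 : List (Int × Int)} (h : l1.Perm l2) (x : Int) :
    pvFL l1 x = pvFL l2 x := List.Perm.sum_eq (h.map _)

theorem pvFL_of_le (l : List (Int × Int)) (p : Int) (h : ∀ e ∈ l, e.1 ≤ p) :
    pvFL l p = (l.map Prod.fst).sum := by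
  induction l with
  | nil => rfl
  | cons a t ih =>
      simp only [pvFL, List.map_cons, List.sum_cons] at *
      rw [min_eq_left (h a (by simp)), ih (fun e he => h e (by simp [he]))]

theorem pvFL_of_ge (l : List (Int × Int)) (p : Int) (h : ∀ e ∈ l, p ≤ e.1) :
    pvFL l p = p * l.length := by
  induction l with
  | nil => simp [pvFL]
  | cons a t ih =>
      simp only [pvFL, List.map_cons, List.sum_cons, List.length_cons] at *
      rw [min_eq_right (h a (by simp)), ih (fun e he => h e (by simp [he]))]
      push_cast
      ring

theorem pvFL_append (l1 l2 : List (Int × Int)) (x : Int) :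
    pvFL (l1 ++ l2) x = pvFL l1 x + pvFL l2 x := by
  simp [pvFL]

theorem pvEaten_mono (ft : List Int) {x y : Int} (h : x ≤ y) :
    pvEaten ft x ≤ pvEaten ft y := by
  induction ft with
  | nil => simp [pvEaten]
  | cons a t ih =>
      simp only [pvEaten, List.map_cons, List.sum_cons] at *
      exact add_le_add (min_le_min le_rfl h) ih

theorem pvEaten_const_below (ft : List Int) (x : Int) (h : ∀ t ∈ ft, x ≤ t) :
    pvEaten ft x = x * ft.length := by
  have := pvFL_of_ge (pvE ft) x (by
    intro e he
    exact h e.1 (by rw [← pvE_map_fst ft]; exact List.mem_map_of_mem he))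
  rw [pvFL_pvE, pvE_length] at this
  exact this

theorem pvEaten_all_above (ft : List Int) (x : Int) (h : ∀ t ∈ ft, t ≤ x) :
    pvEaten ft x = ft.sum := by
  have := pvFL_of_le (pvE ft) x (by
    intro e he
    exact h e.1 (by rw [← pvE_map_fst ft]; exact List.mem_map_of_mem he))
  rw [pvFL_pvE, pvE_map_fst] at this
  exact this

-- the two-block shift identity: raising the level from p to q only charges the elements ≥ q
theorem pvFL_shift (l1 l2 : List (Int × Int)) (p q : Int) (hpq : p ≤ q)
    (h1 : ∀ e ∈ l1, e.1 ≤ p) (h2 : ∀ e ∈ l2, q ≤ e.1) :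
    pvFL (l1 ++ l2) q = pvFL (l1 ++ l2) p + (q - p) * l2.length := by
  rw [pvFL_append, pvFL_append,
    pvFL_of_le l1 q (fun e he => le_trans (h1 e he) hpq),
    pvFL_of_le l1 p h1,
    pvFL_of_ge l2 q h2,
    pvFL_of_ge l2 p (fun e he => le_trans hpq (h2 e he))]
  ring

-- binary-search postcondition
theorem pvBSearch_spec (ft : List Int) (k : Int) : ∀ (n : Nat) (lo hi : Int),
    (hi - lo).toNat = n → pvEaten ft lo ≤ k → k < pvEaten ft hi → lo < hi →
    pvEaten ft (pvBSearch ft k lo hi) ≤ k ∧ k < pvEaten ft (pvBSearch ft k lo hi + 1) := by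
  intro n
  induction n using Nat.strong_induction_on with
  | _ n ih =>
    intro lo hi hn hlo hhi hlt
    rw [pvBSearch]
    split
    · rename_i hstep
      have hmid := PySem.Int.floordiv_two_mid_bounds (lo := lo + 1) (hi := hi - 1) (by omega)
      rw [show lo + 1 + (hi - 1) = lo + hi by ring] at hmid
      split
      · rename_i hm
        exact ih ((hi - PySem.Int.floordiv (lo + hi) 2).toNat) (by omega) _ _ rfl hm hhi (by omega)
      · rename_i hm
        exact ih ((PySem.Int.floordiv (lo + hi) 2 - lo).toNat) (by omega) _ _ rfl hlo
          (by omega) (by omega)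
    · rename_i hstep
      have : hi = lo + 1 := by omega
      exact ⟨hlo, by rw [← this]; exact hhi⟩

-- the common exit expression: indexing the remaining foods at the cyclic offset;
-- both sides name the same list (index-sorted remaining) and the same offset mod its length
theorem exit_eq (ft : List Int) (k sv x c : Int) (s : List (Int × Int))
    (hperm : ((pvE ft).filter (fun e => decide (x < e.1))).Perm s)
    (hc : pvEaten ft x = sv + c * s.length)
    (hne : s ≠ []) :
    ((PySem.List.pyGet? (PySem.List.sorted s (fun e => e.2) false)
        (PySem.Int.mod (k - sv) (s.length : Int))).getD (0, 0)).2
      = (PySem.List.pyGet? (((PySem.List.enumerate ft).filter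
            (fun p => decide (x < p.2))).map (fun p => p.1 + 1))
          (PySem.Int.mod (k - pvEaten ft x)
            ((((PySem.List.enumerate ft).filter (fun p => decide (x < p.2))).map
              (fun p => p.1 + 1)).length : Int))).getD 0 := by
  -- G: the remaining foods in index order
  set F := (PySem.List.enumerate ft).filter (fun p => decide (x < p.2)) with hF
  have hGF : (pvE ft).filter (fun e => decide (x < e.1))
      = F.map (fun p => (p.2, p.1 + 1)) := by
    rw [pvE, List.filter_map]
    rfl
  set G := F.map (fun p : Int × Int => (p.2, p.1 + 1)) with hG
  have hpermG : G.Perm s := by rw [← hGF]; exact hperm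
  -- sorting s by index gives exactly G
  have hFpair : F.Pairwise (fun a b => a.1 < b.1) :=
    List.Pairwise.filter _ (PySem.List.pairwise_lt_enumerate ft 0)
  have hGpair : G.Pairwise (fun a b => a.2 < b.2) := by
    rw [hG, List.pairwise_map]
    exact hFpair.imp (by intro a b h; simpa using h)
  have hsorted : PySem.List.sorted s (fun e => e.2) false = G := by
    apply PySem.List.sorted_eq_of_perm_of_pairwise_lt
    · exact hpermG
    · exact hGpair
  rw [hsorted]
  -- lengths agree, and the two offsets agree mod the length
  have hlen : G.length = s.length := hpermG.length_eq
  have hlenF : (F.map (fun p : Int × Int => p.1 + 1)).length = G.length := by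
    simp [hG]
  have hpos : 0 < s.length := by
    cases s with
    | nil => exact absurd rfl hne
    | cons a t => simp
  have hmod : PySem.Int.mod (k - sv) (s.length : Int)
      = PySem.Int.mod (k - pvEaten ft x)
          ((F.map (fun p : Int × Int => p.1 + 1)).length : Int) := by
    rw [hlenF, hlen]
    rw [PySem.Int.mod_eq_emod_of_pos (by exact_mod_cast hpos : (0:Int) < (s.length : Int)),
      PySem.Int.mod_eq_emod_of_pos (by exact_mod_cast hpos : (0:Int) < (s.length : Int))]
    rw [hc]
    have h1 : k - (sv + c * (s.length : Int)) = (k - sv) + (-c) * (s.length : Int) := by ring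
    rw [h1]
    exact (Int.add_mul_emod_self_right (k - sv) (-c) (s.length : Int)).symm
  rw [← hmod]
  -- the index is in range; both sides pick element j of G / G.map snd
  set j := PySem.Int.mod (k - sv) (s.length : Int) with hj
  have hj0 : 0 ≤ j := PySem.Int.mod_nonneg _ (by exact_mod_cast hpos)
  have hjlt : j < (s.length : Int) := PySem.Int.mod_lt _ (by exact_mod_cast hpos)
  have hjG : j.toNat < G.length := by omega
  have hmapsnd : F.map (fun p : Int × Int => p.1 + 1) = G.map Prod.snd := by
    simp [hG, List.map_map]
  rw [hmapsnd]
  rw [PySem.List.pyGet?_of_nonneg G hj0, PySem.List.pyGet?_of_nonneg (G.map Prod.snd) hj0]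
  have hjF : j.toNat < F.length := by simpa [hG] using hjG
  simp [hG, List.getElem?_map, List.getElem?_eq_getElem hjF]

-- the walk agrees with B's exit expression once the invariant is established
theorem walk_inv (ft : List Int) (k x : Int)
    (hx1 : pvEaten ft x ≤ k) (hx2 : k < pvEaten ft (x + 1))
    (hsum : ¬ ft.sum ≤ k) :
    ∀ (s pre : List (Int × Int)) (sv p : Int),
    PySem.List.sorted (pvE ft) (fun e => toLex e) false = pre ++ s →
    (∀ e ∈ pre, e.1 ≤ p) → (∀ e ∈ s, p ≤ e.1) →
    sv = pvEaten ft p → sv ≤ k →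
    pvWalk k s sv p
      = (PySem.List.pyGet? (((PySem.List.enumerate ft).filter
            (fun q => decide (x < q.2))).map (fun q => q.1 + 1))
          (PySem.Int.mod (k - pvEaten ft x)
            ((((PySem.List.enumerate ft).filter (fun q => decide (x < q.2))).map
              (fun q => q.1 + 1)).length : Int))).getD 0 := by
  intro s
  induction s with
  | nil =>
      intro pre sv p hsplit hub hlb hsv hk
      exfalso
      apply hsum
      have hperm : (pvE ft).Perm pre := by
        have h1 := PySem.List.sorted_perm (pvE ft) (fun e => toLex e) false
        rw [hsplit] at h1
        have h2 : pre.Perm (pvE ft) := by simpa using h1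
        exact h2.symm
      have heq : pvEaten ft p = (pre.map Prod.fst).sum := by
        rw [← pvFL_pvE, pvFL_perm hperm, pvFL_of_le pre p hub]
      have h2 : ((pvE ft).map Prod.fst).sum = (pre.map Prod.fst).sum :=
        List.Perm.sum_eq (hperm.map Prod.fst)
      have hsumeq : pvEaten ft p = ft.sum := by
        rw [heq, ← h2, pvE_map_fst]
      calc ft.sum = pvEaten ft p := hsumeq.symm
        _ = sv := hsv.symm
        _ ≤ k := hk
  | cons hd rest ih =>
      intro pre sv p hsplit hub hlb hsv hk
      -- sortedness of the suffix: every element of hd :: rest has time ≥ hd.1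
      have hpairAll : (PySem.List.sorted (pvE ft) (fun e => toLex e) false).Pairwise
          (fun a b => a.1 ≤ b.1) := by
        have := PySem.List.sorted_pairwise (pvE ft) (fun e => toLex e)
        exact this.imp (by
          intro a b hab
          exact (Prod.Lex.toLex_le_toLex.mp hab).elim (fun h => le_of_lt h) (fun h => le_of_eq h.1))
      have hpairS : (hd :: rest).Pairwise (fun a b => a.1 ≤ b.1) := by
        rw [hsplit] at hpairAll
        exact hpairAll.sublist (List.sublist_append_right pre (hd :: rest))
      have hrestge : ∀ e ∈ rest, hd.1 ≤ e.1 := (List.pairwise_cons.1 hpairS).1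
      have hsge : ∀ e ∈ hd :: rest, hd.1 ≤ e.1 := by
        intro e he
        rcases List.mem_cons.1 he with h | h
        · rw [h]
        · exact hrestge e h
      have hphd : p ≤ hd.1 := hlb hd (by simp)
      -- the level-shift identity at this step: eaten(hd.1) = sv + (hd.1 - p) * |s|
      have hperm : (pvE ft).Perm (pre ++ hd :: rest) := by
        have := PySem.List.sorted_perm (pvE ft) (fun e => toLex e) false
        rw [hsplit] at this
        exact this.symm
      have hshift : pvEaten ft hd.1 = sv + (hd.1 - p) * ((hd :: rest).length : Int) := by
        rw [hsv, ← pvFL_pvE, ← pvFL_pvE, pvFL_perm hperm, pvFL_perm hperm]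
        exact pvFL_shift pre (hd :: rest) p hd.1 hphd hub hsge
      rw [pvWalk]
      split
      · -- loop continues: pop hd, new level hd.1
        rename_i hcond
        apply ih (pre ++ [hd]) _ hd.1
        · rw [hsplit]; simp
        · intro e he
          rcases List.mem_append.1 he with h | h
          · exact le_trans (hub e h) hphd
          · simpa using congrArg Prod.fst (List.mem_singleton.1 h) ▸ le_refl hd.1
        · exact hrestge
        · rw [hshift]
        · exact le_trans (le_of_eq rfl) hcond
      · -- loop exits: apply the common exit lemma at level x
        rename_i hcond
        have hkm : k < pvEaten ft hd.1 := by rw [hshift]; omega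
        -- p ≤ x < hd.1
        have hpx : p ≤ x := by
          by_contra h
          have : x + 1 ≤ p := by omega
          exact absurd (le_trans (pvEaten_mono ft this) (hsv ▸ hk)) (not_le.mpr hx2)
        have hxm : x < hd.1 := by
          by_contra h
          exact absurd (le_trans (pvEaten_mono ft (not_lt.mp h)) hx1) (not_le.mpr hkm)
        apply exit_eq ft k sv x (x - p) (hd :: rest)
        · -- remaining = filter: pre is below x, s is above x
          have hfilt : (pre ++ hd :: rest).filter (fun e => decide (x < e.1)) = hd :: rest := by
            rw [List.filter_append]
            rw [List.filter_eq_nil_iff.mpr (by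
              intro e he
              simp only [decide_eq_true_eq]
              exact not_lt.mpr (le_trans (hub e he) hpx))]
            rw [List.filter_eq_self.mpr (by
              intro e he
              simp only [decide_eq_true_eq]
              exact lt_of_lt_of_le hxm (hsge e he))]
            simp
          have hpf := hperm.filter (fun e => decide (x < e.1))
          rw [hfilt] at hpf
          exact hpf
        · -- eaten(x) = sv + (x - p) * |s|
          have hshiftx : pvEaten ft x = pvEaten ft p + (x - p) * ((hd :: rest).length : Int) := by
            rw [← pvFL_pvE, ← pvFL_pvE, pvFL_perm hperm, pvFL_perm hperm]
            exact pvFL_shift pre (hd :: rest) p x hpx hub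
              (fun e he => le_trans (by omega) (hsge e he))
          rw [hshiftx, hsv]
        · exact List.cons_ne_nil hd rest

-- the walk from its initial state (prev = 0, nothing eaten) agrees with B's exit expression
theorem walk_start (ft : List Int) (k : Int) (hft : ft ≠ []) (hsum : ¬ ft.sum ≤ k)
    (x : Int) (hx1 : pvEaten ft x ≤ k) (hx2 : k < pvEaten ft (x + 1)) :
    pvWalk k (PySem.List.sorted (pvE ft) (fun e => toLex e) false) 0 0
      = (PySem.List.pyGet? (((PySem.List.enumerate ft).filter
            (fun q => decide (x < q.2))).map (fun q => q.1 + 1))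
          (PySem.Int.mod (k - pvEaten ft x)
            ((((PySem.List.enumerate ft).filter (fun q => decide (x < q.2))).map
              (fun q => q.1 + 1)).length : Int))).getD 0 := by
  cases hS : PySem.List.sorted (pvE ft) (fun e => toLex e) false with
  | nil =>
      exfalso
      have := congrArg List.length hS
      rw [PySem.List.length_sorted, pvE_length] at this
      exact hft (List.length_eq_zero_iff.mp (by simpa using this))
  | cons hd rest =>
      have hSperm : (hd :: rest).Perm (pvE ft) := by
        rw [← hS]; exact PySem.List.sorted_perm (pvE ft) (fun e => toLex e) false
      have hpairAll : (PySem.List.sorted (pvE ft) (fun e => toLex e) false).Pairwise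
          (fun a b => a.1 ≤ b.1) := by
        have := PySem.List.sorted_pairwise (pvE ft) (fun e => toLex e)
        exact this.imp (by
          intro a b hab
          exact (Prod.Lex.toLex_le_toLex.mp hab).elim (fun h => le_of_lt h) (fun h => le_of_eq h.1))
      rw [hS] at hpairAll
      have hrestge : ∀ e ∈ rest, hd.1 ≤ e.1 := (List.pairwise_cons.1 hpairAll).1
      have hallS : ∀ e ∈ hd :: rest, hd.1 ≤ e.1 := by
        intro e he
        rcases List.mem_cons.1 he with h | h
        · rw [h]
        · exact hrestge e h
      have hallft : ∀ t ∈ ft, hd.1 ≤ t := by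
        intro t ht
        have h1 : t ∈ (pvE ft).map Prod.fst := by rw [pvE_map_fst]; exact ht
        obtain ⟨e, he, rfl⟩ := List.mem_map.1 h1
        exact hallS e (hSperm.mem_iff.2 he)
      have hlenS : (hd :: rest).length = ft.length := by
        rw [← hS, PySem.List.length_sorted, pvE_length]
      have heatenhd : pvEaten ft hd.1 = hd.1 * (ft.length : Int) :=
        pvEaten_const_below ft hd.1 hallft
      rw [pvWalk]
      split
      · rename_i hcond
        apply walk_inv ft k x hx1 hx2 hsum rest [hd] _ hd.1
        · rw [hS]; rfl
        · intro e he
          rw [List.mem_singleton.1 he]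
        · exact hrestge
        · rw [heatenhd, ← hlenS]
          ring
        · exact hcond
      · rename_i hcond
        have hklt : k < pvEaten ft hd.1 := by
          rw [heatenhd, ← hlenS]
          by_contra h
          exact hcond (by
            have := not_lt.mp h
            calc 0 + (hd.1 - 0) * ((rest.length : Int) + 1)
                = hd.1 * ((rest.length : Int) + 1) := by ring
              _ ≤ k := this)
        have hxhd : x < hd.1 := by
          by_contra h
          exact absurd (le_trans (pvEaten_mono ft (not_lt.mp h)) hx1) (not_le.mpr hklt)
        apply exit_eq ft k 0 x x (hd :: rest)
        · have hfe : (pvE ft).filter (fun e => decide (x < e.1)) = pvE ft :=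
            List.filter_eq_self.mpr (by
              intro e he
              simp only [decide_eq_true_eq]
              have : e.1 ∈ ft := by rw [← pvE_map_fst ft]; exact List.mem_map_of_mem he
              exact lt_of_lt_of_le hxhd (hallft e.1 this))
          rw [hfe]
          exact hSperm.symm
        · have hxall : ∀ t ∈ ft, x ≤ t := fun t ht => le_of_lt (lt_of_lt_of_le hxhd (hallft t ht))
          rw [pvEaten_const_below ft x hxall, ← hlenS]
          ring
        · exact List.cons_ne_nil hd rest

-- ===== VERDICT (by name: the statement is the Claim_ definition above) =====
theorem solution_spec : Claim_equal_solution := by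
  intro ft k hdom hpre
  unfold Spec_solution solution solution_alt
  by_cases hs : ft.sum ≤ k
  · simp [hs]
  · simp only [hs, if_false]
    have hft : ft ≠ [] := by
      intro h
      subst h
      exact hs (by simpa using hpre rfl)
    have hn1 : (1 : Int) ≤ (ft.length : Int) := by
      have : ft.length ≠ 0 := by simpa [List.length_eq_zero_iff] using hft
      omega
    cases hmin : PySem.List.min? ft (fun t => t) with
    | none => exact absurd ((PySem.List.min?_eq_none_iff ft _).1 hmin) hft
    | some m =>
    cases hmax : PySem.List.max? ft (fun t => t) with
    | none => exact absurd ((PySem.List.max?_eq_none_iff ft _).1 hmax) hft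
    | some M =>
    -- the binary-search bracket [lo, hi) is valid
    have hloval : ((PySem.List.min? ft (fun t => t)).getD 0) = m := by rw [hmin]; rfl
    have hhival : ((PySem.List.max? ft (fun t => t)).getD 0) = M := by rw [hmax]; rfl
    have hLle : ∀ t ∈ ft, min ((PySem.List.min? ft (fun t => t)).getD 0) (-|k| - 1) ≤ t := by
      intro t ht
      rw [hloval]
      exact le_trans (min_le_left _ _) (PySem.List.min?_isMin hmin t ht)
    have hlo : pvEaten ft (min ((PySem.List.min? ft (fun t => t)).getD 0) (-|k| - 1)) ≤ k := by
      rw [pvEaten_const_below ft _ hLle]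
      have hL0 : min ((PySem.List.min? ft (fun t => t)).getD 0) (-|k| - 1) ≤ -|k| - 1 :=
        min_le_right _ _
      have habs : -|k| ≤ k := neg_abs_le k
      have habs0 : 0 ≤ |k| := abs_nonneg k
      have hneg : min ((PySem.List.min? ft (fun t => t)).getD 0) (-|k| - 1) ≤ 0 := by linarith
      have hmul := mul_le_mul_of_nonpos_left hn1 hneg
      rw [mul_one] at hmul
      linarith
    have hhi : k < pvEaten ft ((PySem.List.max? ft (fun t => t)).getD 0) := by
      rw [hhival, pvEaten_all_above ft M (PySem.List.max?_isMax hmax)]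
      exact not_le.mp hs
    have hlohi : min ((PySem.List.min? ft (fun t => t)).getD 0) (-|k| - 1)
        < (PySem.List.max? ft (fun t => t)).getD 0 := by
      have hle : min ((PySem.List.min? ft (fun t => t)).getD 0) (-|k| - 1)
          ≤ (PySem.List.max? ft (fun t => t)).getD 0 := by
        rw [hloval, hhival]
        exact le_trans (min_le_left _ _)
          (PySem.List.max?_isMax hmax m (PySem.List.min?_mem hmin))
      rcases eq_or_lt_of_le hle with heq | hlt
      · exfalso
        rw [heq] at hlo
        exact absurd hlo (not_le.mpr hhi)
      · exact hlt
    obtain ⟨hx1, hx2⟩ := pvBSearch_spec ft k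
      (((PySem.List.max? ft (fun t => t)).getD 0
        - min ((PySem.List.min? ft (fun t => t)).getD 0) (-|k| - 1)).toNat)
      _ _ rfl hlo hhi hlohi
    have hA : pvLoopA k (pvE ft) 0 0 (ft.length : Int)
        = pvWalk k (PySem.List.sorted (pvE ft) (fun e => toLex e) false) 0 0 := by
      have h := loop_eq k (pvE ft).length (pvE ft) rfl (enumerate_snd_nodup ft) 0 0
      rwa [pvE_length] at h
    rw [hmin, hmax] at hx1 hx2
    exact hA.trans (walk_start ft k hft hs _ hx1 hx2)
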